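-- pv_equiv track=rewrite | github.com/hey-granth/codectx-benchmarking | benchmark_codectx.py | parse_ranked_files
-- ===== SOURCE A (Python) =====
-- def parse_ranked_files(context_text):
--     in_ranked = False
--     represented = 0
--
--     for line in context_text.splitlines():
--         stripped = line.strip()
--         upper = stripped.upper()
--
--         if upper.startswith("##") and "RANKED_FILES" in upper:
--             in_ranked = True
--             continue
--
--         if in_ranked and upper.startswith("##") and "RANKED_FILES" not in upper:
--             break
--
--         if not in_ranked or not stripped:
--             continue
--
--         if stripped.startswith(("```", "|", "---")):
--             continue
--
--         is_bullet = stripped.startswith(("-", "*"))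
--         is_numbered = stripped[0].isdigit() if stripped else False
--         if not (is_bullet or is_numbered):
--             continue
--
--         if "periphery" not in stripped.lower():
--             represented += 1
--
--     return represented
-- ===== SOURCE B (Python) =====
-- def _is_ranked_header(line):
--     u = line.strip().upper()
--     return u.startswith("##") and "RANKED_FILES" in u
--
--
-- def _is_other_header(line):
--     u = line.strip().upper()
--     return u.startswith("##") and "RANKED_FILES" not in u
--
--
-- def _counts(line):
--     s = line.strip()
--     if not s or s.startswith(("```", "|", "---")):
--         return False
--     if not (s.startswith(("-", "*")) or s[0].isdigit()):
--         return False
--     return "periphery" not in s.lower()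
--
--
-- def parse_ranked_files(context_text):
--     lines = context_text.splitlines()
--     # lines after the first RANKED_FILES header ([] if there is none)
--     rest = []
--     for i, line in enumerate(lines):
--         if _is_ranked_header(line):
--             rest = lines[i + 1:]
--             break
--     # the section: up to (not including) the first non-RANKED ## header
--     section = []
--     for line in rest:
--         if _is_other_header(line):
--             break
--         section.append(line)
--     return sum(1 for line in section if _counts(line))
-- ===== Notes on version B (the rewrite author's own statement) =====
-- stated objective: simpler
-- what changed: A's single pass with an in_ranked flag and a break is replaced by first extracting the RANKED_FILES section as a sublist (drop lines up to the first RANKED_FILES header, then take until the first other ## header) and then counting the qualifying bullet lines in that sublist with a simple per-line predicate.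
import Mathlib
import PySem

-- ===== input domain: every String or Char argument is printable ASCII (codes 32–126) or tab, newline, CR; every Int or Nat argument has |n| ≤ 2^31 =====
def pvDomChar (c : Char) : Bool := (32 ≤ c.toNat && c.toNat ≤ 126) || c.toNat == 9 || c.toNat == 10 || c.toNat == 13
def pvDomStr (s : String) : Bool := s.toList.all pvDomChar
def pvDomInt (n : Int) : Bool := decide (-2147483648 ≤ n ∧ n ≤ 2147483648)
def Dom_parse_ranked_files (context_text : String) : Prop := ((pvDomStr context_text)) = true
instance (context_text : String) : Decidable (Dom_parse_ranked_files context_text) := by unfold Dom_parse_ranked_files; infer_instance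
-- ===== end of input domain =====

-- B replaces A's one-pass state machine (in_ranked flag + break) by first extracting the
-- RANKED_FILES section as a sublist and then counting the qualifying bullet lines in it (simpler decomposition).

-- ===== PORT A =====
def parse_ranked_files_loop : List String → Bool → Int → Int
  | [], _, represented => represented
  | line :: rest, in_ranked, represented =>
    let stripped := PySem.Str.strip line
    let upper := PySem.Str.upper stripped
    if PySem.Str.startswith upper "##" && PySem.Str.isIn "RANKED_FILES" upper then
      parse_ranked_files_loop rest true represented
    else if in_ranked && (PySem.Str.startswith upper "##" && !PySem.Str.isIn "RANKED_FILES" upper) then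
      represented
    else if !in_ranked || PySem.Str.len stripped == 0 then
      parse_ranked_files_loop rest in_ranked represented
    else if PySem.Str.startswith stripped "```" || PySem.Str.startswith stripped "|" ||
            PySem.Str.startswith stripped "---" then
      parse_ranked_files_loop rest in_ranked represented
    else
      let is_bullet := PySem.Str.startswith stripped "-" || PySem.Str.startswith stripped "*"
      -- stripped[0].isdigit() if stripped else False
      let is_numbered := match stripped.toList with
        | [] => false
        | c :: _ => PySem.Chars.isdigit c
      if !(is_bullet || is_numbered) then
        parse_ranked_files_loop rest in_ranked represented
      else if !PySem.Str.isIn "periphery" (PySem.Str.lower stripped) then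
        parse_ranked_files_loop rest in_ranked (represented + 1)
      else
        parse_ranked_files_loop rest in_ranked represented

def parse_ranked_files (context_text : String) : Int :=
  parse_ranked_files_loop (PySem.Str.splitlines context_text) false 0

-- ===== PORT B =====
-- u = line.strip().upper()
def pvIsRankedHeader (line : String) : Bool :=
  PySem.Str.startswith (PySem.Str.upper (PySem.Str.strip line)) "##" &&
    PySem.Str.isIn "RANKED_FILES" (PySem.Str.upper (PySem.Str.strip line))

def pvIsOtherHeader (line : String) : Bool :=
  PySem.Str.startswith (PySem.Str.upper (PySem.Str.strip line)) "##" &&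
    !PySem.Str.isIn "RANKED_FILES" (PySem.Str.upper (PySem.Str.strip line))

def pvCounts (line : String) : Bool :=
  let s := PySem.Str.strip line
  if PySem.Str.len s == 0 || (PySem.Str.startswith s "```" || PySem.Str.startswith s "|" ||
      PySem.Str.startswith s "---") then false
  else if !(PySem.Str.startswith s "-" || PySem.Str.startswith s "*" ||
      (match s.toList with | [] => false | c :: _ => PySem.Chars.isdigit c)) then false
  else !PySem.Str.isIn "periphery" (PySem.Str.lower s)

-- lines after the first RANKED_FILES header ([] if there is none)
def pvRest : List String → List String
  | [] => []
  | l :: ls => if pvIsRankedHeader l then ls else pvRest ls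

-- the section: up to (not including) the first non-RANKED ## header
def pvSection : List String → List String
  | [] => []
  | l :: ls => if pvIsOtherHeader l then [] else l :: pvSection ls

def parse_ranked_files_alt (context_text : String) : Int :=
  ((pvSection (pvRest (PySem.Str.splitlines context_text))).countP pvCounts : Int)

-- ===== PRECONDITION & SPEC =====
def Spec_parse_ranked_files (context_text : String) (out : Int) : Prop := out = parse_ranked_files_alt context_text
instance (context_text : String) (out : Int) : Decidable (Spec_parse_ranked_files context_text out) := by unfold Spec_parse_ranked_files; infer_instance

-- ===== CLAIM (what is proved, stated in full; the proofs are below) =====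
def Claim_equal_parse_ranked_files : Prop := ∀ (context_text : String), Dom_parse_ranked_files context_text → Spec_parse_ranked_files context_text (parse_ranked_files context_text)

-- ===== LEMMAS AND PROOFS =====

lemma pv_upperChar_hash {c : Char} (h : PySem.Chars.upperChar c = '#') : c = '#' := by
  unfold PySem.Chars.upperChar at h
  split at h
  · exfalso
    rename_i hl
    unfold PySem.Chars.islower at hl
    simp only [Bool.and_eq_true, decide_eq_true_eq] at hl
    have h1 : 97 ≤ c.toNat := hl.1
    have h2 : c.toNat ≤ 122 := hl.2
    have hval : (c.toNat - 32).isValidChar := by left; omega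
    have hv : (Char.ofNat (c.toNat - 32)).toNat = c.toNat - 32 := by
      rw [Char.toNat_ofNat, if_pos hval]
    have h35 := congrArg Char.toNat h
    rw [hv] at h35
    have : ('#':Char).toNat = 35 := rfl
    omega
  · exact h

-- a line whose stripped-uppercased form starts with "##" is never counted as a bullet
lemma pv_counts_false_of_hash (l : String)
    (h : PySem.Str.startswith (PySem.Str.upper (PySem.Str.strip l)) "##" = true) :
    pvCounts l = false := by
  rw [PySem.Str.startswith_eq, PySem.Str.toList_upper, PySem.Str.toList_strip] at h
  rw [PySem.Chars.startswith_iff] at h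
  unfold PySem.Chars.upper at h
  obtain ⟨tl, htl⟩ := h
  have h2 : ∃ c1 tl1, PySem.Chars.strip l.toList = c1 :: tl1 ∧ PySem.Chars.upperChar c1 = '#' := by
    cases hcs : PySem.Chars.strip l.toList with
    | nil => rw [hcs] at htl; simp at htl
    | cons c1 tl1 =>
      rw [hcs] at htl
      simp only [List.map_cons] at htl
      have he : "##".toList = ['#', '#'] := rfl
      rw [he] at htl
      simp only [List.cons_append, List.nil_append] at htl
      injection htl with hh1 _
      exact ⟨c1, tl1, rfl, hh1.symm⟩
  obtain ⟨c1, tl1, hcs, hc1⟩ := h2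
  have hc1' : c1 = '#' := pv_upperChar_hash hc1
  unfold pvCounts
  simp only [PySem.Str.startswith_eq, PySem.Str.toList_strip, PySem.Str.len_eq, hcs, hc1']
  simp [PySem.Chars.startswith, List.isPrefixOf, PySem.Chars.isdigit]

-- A's branch structure on one line, phrased with B's predicates
lemma pv_loop_cons (l : String) (ls : List String) (b : Bool) (r : Int) :
    parse_ranked_files_loop (l :: ls) b r =
      if pvIsRankedHeader l then parse_ranked_files_loop ls true r
      else if b && pvIsOtherHeader l then r
      else if b then parse_ranked_files_loop ls b (r + if pvCounts l then 1 else 0)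
      else parse_ranked_files_loop ls b r := by
  simp only [parse_ranked_files_loop, pvIsRankedHeader, pvIsOtherHeader, pvCounts]
  cases b <;> split_ifs <;> simp_all

lemma pv_loop_true (ls : List String) (r : Int) :
    parse_ranked_files_loop ls true r = r + ((pvSection ls).countP pvCounts : Int) := by
  induction ls generalizing r with
  | nil => simp [parse_ranked_files_loop, pvSection]
  | cons l ls ih =>
    rw [pv_loop_cons]
    by_cases hr : pvIsRankedHeader l = true
    · have hr' := hr
      unfold pvIsRankedHeader at hr'
      rw [Bool.and_eq_true] at hr'
      have hcnt := pv_counts_false_of_hash l hr'.1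
      have hoth : pvIsOtherHeader l = false := by
        unfold pvIsOtherHeader
        rw [hr'.2]
        simp
      have hsec : pvSection (l :: ls) = l :: pvSection ls := by
        simp only [pvSection]
        rw [if_neg (by simp [hoth])]
      rw [if_pos hr, ih, hsec, List.countP_cons, hcnt]
      simp
    · rw [if_neg hr]
      by_cases ho : pvIsOtherHeader l = true
      · rw [if_pos (by simp [ho])]
        simp only [pvSection]
        rw [if_pos ho]
        simp
      · rw [if_neg (by simp [ho]), if_pos rfl, ih]
        have hsec : pvSection (l :: ls) = l :: pvSection ls := by
          simp only [pvSection]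
          rw [if_neg ho]
        rw [hsec, List.countP_cons]
        by_cases hc : pvCounts l = true
        · rw [hc]
          push_cast
          ring
        · rw [Bool.not_eq_true] at hc
          rw [hc]
          push_cast
          simp

lemma pv_loop_false (ls : List String) (r : Int) :
    parse_ranked_files_loop ls false r = r + ((pvSection (pvRest ls)).countP pvCounts : Int) := by
  induction ls generalizing r with
  | nil => simp [parse_ranked_files_loop, pvRest, pvSection]
  | cons l ls ih =>
    rw [pv_loop_cons]
    by_cases hr : pvIsRankedHeader l = true
    · rw [if_pos hr, pv_loop_true]
      have : pvRest (l :: ls) = ls := by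
        simp only [pvRest]
        rw [if_pos hr]
      rw [this]
    · rw [if_neg hr, if_neg (by simp), if_neg (by simp), ih]
      have : pvRest (l :: ls) = pvRest ls := by
        simp only [pvRest]
        rw [if_neg hr]
      rw [this]

-- ===== VERDICT (by name: the statement is the Claim_ definition above) =====
theorem parse_ranked_files_spec : Claim_equal_parse_ranked_files := by
  intro s _
  unfold Spec_parse_ranked_files parse_ranked_files parse_ranked_files_alt
  rw [pv_loop_false]
  simp
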